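-- pv_equiv track=rewrite | github.com/Zinovkin-Artem/web_data_pest_control | page_9_table_danix.py | parse_equipment_input
-- ===== SOURCE A (Python) =====
-- def parse_equipment_input(s: str):
--     s = (s or "").strip()
--     if not s:
--         return []
--
--     nums = set()
--
--     # разделяем по запятым
--     parts = [p.strip() for p in s.split(",") if p.strip()]
--
--     for part in parts:
--         # диапазон: "5-12"
--         if "-" in part:
--             a, b = part.split("-", 1)
--             a, b = a.strip(), b.strip()
--             if a.isdigit() and b.isdigit():
--                 start, end = int(a), int(b)
--                 if start <= end:
--                     for x in range(start, end + 1):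
--                         nums.add(x)
--                 else:
--                     for x in range(end, start + 1):
--                         nums.add(x)
--         else:
--             # одиночное число
--             if part.isdigit():
--                 nums.add(int(part))
--
--     return sorted(nums)
-- ===== SOURCE B (Python) =====
-- def _interval(part):
--     # parse one comma-separated piece into a closed interval, or None if it
--     # is not a digit-only number or digit-only range (same acceptance as A)
--     if "-" in part:
--         a, b = part.split("-", 1)
--         a, b = a.strip(), b.strip()
--         if a.isdigit() and b.isdigit():
--             x, y = int(a), int(b)
--             return (min(x, y), max(x, y))
--         return None
--     if part.isdigit():
--         v = int(part)
--         return (v, v)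
--     return None
--
--
-- def parse_equipment_input(s: str):
--     ivs = []
--     for p in (s or "").strip().split(","):
--         iv = _interval(p.strip())
--         if iv is not None:
--             ivs.append(iv)
--     ivs.sort(key=lambda t: t[0])
--     if not ivs:
--         return []
--     merged = []
--     (lo, hi), rest = ivs[0], ivs[1:]
--     for l, h in rest:
--         if l <= hi + 1:
--             hi = max(hi, h)
--         else:
--             merged.append((lo, hi))
--             lo, hi = l, h
--     merged.append((lo, hi))
--     return [x for lo, hi in merged for x in range(lo, hi + 1)]
-- ===== Notes on version B (the rewrite author's own statement) =====
-- stated objective: alternative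
-- what changed: A expands every range into a hash set of points and sorts the set at the end; B parses each part into a closed (start,end) interval, sorts the intervals by start, merges overlapping or contiguous ones in one sweep, and only then expands the disjoint merged intervals in order (no set, no final sort over points).
import Mathlib
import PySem

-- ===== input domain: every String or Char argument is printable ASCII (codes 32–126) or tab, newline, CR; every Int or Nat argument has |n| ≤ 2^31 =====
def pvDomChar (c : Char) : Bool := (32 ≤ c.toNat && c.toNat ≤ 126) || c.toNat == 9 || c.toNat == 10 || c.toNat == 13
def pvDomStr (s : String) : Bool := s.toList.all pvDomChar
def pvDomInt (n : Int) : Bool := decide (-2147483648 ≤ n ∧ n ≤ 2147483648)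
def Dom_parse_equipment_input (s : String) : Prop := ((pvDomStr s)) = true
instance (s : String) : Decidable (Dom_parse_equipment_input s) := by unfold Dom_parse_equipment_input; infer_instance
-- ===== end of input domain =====

-- B replaces A's hash-set of expanded points (expand every range, dedup, sort) by
-- sort-then-merge on intervals: parse each part to a closed interval, sort by start,
-- sweep once merging overlapping/contiguous intervals, expand at the end (objective: alternative).

-- ===== PORT A =====
-- loop body of A's 'for part in parts' (literal transliteration of the branch)
def pvStepA (ns : PySem.Set Int) (part : String) : PySem.Set Int :=
  if PySem.Str.isIn "-" part then
    match PySem.Str.splitMax? part "-" 1 with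
    | some (a0 :: b0 :: _) =>
      let a := PySem.Str.strip a0
      let b := PySem.Str.strip b0
      if PySem.Str.strIsdigit a && PySem.Str.strIsdigit b then
        let start := (PySem.Int.ofStr? a).getD 0
        let stop := (PySem.Int.ofStr? b).getD 0
        if start ≤ stop then
          (PySem.List.pyRange start (stop + 1) 1).foldl (fun ns x => PySem.Set.add ns x) ns
        else
          (PySem.List.pyRange stop (start + 1) 1).foldl (fun ns x => PySem.Set.add ns x) ns
      else ns
    | _ => ns  -- unreachable: '-' is in part, so the split has two pieces
  else
    if PySem.Str.strIsdigit part then PySem.Set.add ns ((PySem.Int.ofStr? part).getD 0) else ns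

def parse_equipment_input (s : String) : List Int :=
  let t := PySem.Str.strip s
  if t = "" then []
  else
    let parts := (((PySem.Str.split? t ",").getD []).map PySem.Str.strip).filter (fun p => p != "")
    let nums := parts.foldl pvStepA PySem.Set.empty
    PySem.List.sorted nums (fun x => x) false

-- ===== PORT B =====
-- parse one comma piece into a closed interval (same acceptance as A), or none
def pvInterval (part : String) : Option (Int × Int) :=
  if PySem.Str.isIn "-" part then
    match PySem.Str.splitMax? part "-" 1 with
    | some (a0 :: b0 :: _) =>
      let a := PySem.Str.strip a0
      let b := PySem.Str.strip b0
      if PySem.Str.strIsdigit a && PySem.Str.strIsdigit b then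
        let x := (PySem.Int.ofStr? a).getD 0
        let y := (PySem.Int.ofStr? b).getD 0
        some (min x y, max x y)
      else none
    | _ => none
  else
    if PySem.Str.strIsdigit part then
      let v := (PySem.Int.ofStr? part).getD 0
      some (v, v)
    else none

-- the merging sweep: (merged-so-far, current lo, current hi) over the remaining sorted intervals
def pvMergeLoop : List (Int × Int) → List (Int × Int) → Int → Int → List (Int × Int)
  | [], merged, lo, hi => merged ++ [(lo, hi)]
  | (l, h) :: rest, merged, lo, hi =>
    if l ≤ hi + 1 then pvMergeLoop rest merged lo (max hi h)
    else pvMergeLoop rest (merged ++ [(lo, hi)]) l h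

def parse_equipment_input_alt (s : String) : List Int :=
  let pieces := (PySem.Str.split? (PySem.Str.strip s) ",").getD []
  let ivs := pieces.filterMap (fun p => pvInterval (PySem.Str.strip p))
  let ivs := PySem.List.sorted ivs (fun t => t.1) false
  match ivs with
  | [] => []
  | (lo, hi) :: rest =>
    (pvMergeLoop rest [] lo hi).flatMap (fun p => PySem.List.pyRange p.1 (p.2 + 1) 1)

-- ===== PRECONDITION & SPEC =====
def Spec_parse_equipment_input (s : String) (out : List Int) : Prop := out = parse_equipment_input_alt s
instance (s : String) (out : List Int) : Decidable (Spec_parse_equipment_input s out) := by unfold Spec_parse_equipment_input; infer_instance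

-- ===== CLAIM (what is proved, stated in full; the proofs are below) =====
def Claim_equal_parse_equipment_input : Prop := ∀ (s : String), Dom_parse_equipment_input s → Spec_parse_equipment_input s (parse_equipment_input s)

-- ===== LEMMAS AND PROOFS =====

lemma pvInterval_valid {p : String} {iv : Int × Int} (h : pvInterval p = some iv) :
    iv.1 ≤ iv.2 := by
  unfold pvInterval at h
  split_ifs at h
  · split at h
    · dsimp only at h
      split_ifs at h
      simp only [Option.some.injEq] at h
      subst h
      simp
    · exact absurd h (by simp)
  · dsimp only at h
    simp only [Option.some.injEq] at h
    subst h
    exact le_refl _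

lemma pvInterval_empty : pvInterval "" = none := by decide

lemma pv_foldl_add_update (ns : PySem.Set Int) (l : List Int) :
    l.foldl (fun s x => PySem.Set.add s x) ns = PySem.Set.update ns l := rfl

-- A's loop body adds exactly the points of the part's interval (and keeps the set Nodup)
lemma pvStepA_char (ns : PySem.Set Int) (part : String) (hnd : ns.Nodup) :
    (pvStepA ns part).Nodup ∧
    ∀ x, x ∈ pvStepA ns part ↔
      x ∈ ns ∨ ∃ iv, pvInterval part = some iv ∧ iv.1 ≤ x ∧ x ≤ iv.2 := by
  by_cases hin : PySem.Str.isIn "-" part = true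
  · rcases hsp : PySem.Str.splitMax? part "-" 1 with _ | pieces
    · simp only [pvStepA, pvInterval, hin, if_pos, hsp]
      exact ⟨hnd, fun x => by simp⟩
    · rcases pieces with _ | ⟨a0, _ | ⟨b0, tl⟩⟩
      · simp only [pvStepA, pvInterval, hin, if_pos, hsp]
        exact ⟨hnd, fun x => by simp⟩
      · simp only [pvStepA, pvInterval, hin, if_pos, hsp]
        exact ⟨hnd, fun x => by simp⟩
      · simp only [pvStepA, pvInterval, hin, if_pos, hsp]
        split_ifs with hdig hle
        · refine ⟨by rw [pv_foldl_add_update]; exact PySem.Set.nodup_update ns _ hnd,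
            fun x => ?_⟩
          rw [pv_foldl_add_update, PySem.Set.mem_update]
          simp only [PySem.List.mem_pyRange_one, Option.some.injEq]
          constructor
          · rintro (h | h)
            · exact Or.inl h
            · exact Or.inr ⟨_, rfl, by constructor <;> simp <;> omega⟩
          · rintro (h | ⟨iv, hiv, h1, h2⟩)
            · exact Or.inl h
            · subst hiv
              simp only at h1 h2
              right; omega
        · refine ⟨by rw [pv_foldl_add_update]; exact PySem.Set.nodup_update ns _ hnd,
            fun x => ?_⟩
          rw [pv_foldl_add_update, PySem.Set.mem_update]
          simp only [PySem.List.mem_pyRange_one, Option.some.injEq]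
          constructor
          · rintro (h | h)
            · exact Or.inl h
            · exact Or.inr ⟨_, rfl, by constructor <;> simp <;> omega⟩
          · rintro (h | ⟨iv, hiv, h1, h2⟩)
            · exact Or.inl h
            · subst hiv
              simp only at h1 h2
              right; omega
        · exact ⟨hnd, fun x => by simp⟩
  · simp only [pvStepA, pvInterval, hin, if_neg, Bool.not_eq_true]
    split_ifs with hdig
    · refine ⟨PySem.Set.nodup_add ns _ hnd, fun x => ?_⟩
      rw [PySem.Set.mem_add]
      simp only [Option.some.injEq]
      constructor
      · rintro (h | h)
        · exact Or.inl h
        · subst h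
          exact Or.inr ⟨_, rfl, by simp⟩
      · rintro (h | ⟨iv, hiv, h1, h2⟩)
        · exact Or.inl h
        · subst hiv
          simp only at h1 h2
          right; omega
    · exact ⟨hnd, fun x => by simp⟩

lemma pvFoldA_char (parts : List String) (ns : PySem.Set Int) (hnd : ns.Nodup) :
    (parts.foldl pvStepA ns).Nodup ∧
    ∀ x, x ∈ parts.foldl pvStepA ns ↔
      x ∈ ns ∨ ∃ p ∈ parts, ∃ iv, pvInterval p = some iv ∧ iv.1 ≤ x ∧ x ≤ iv.2 := by
  induction parts generalizing ns with
  | nil => exact ⟨hnd, fun x => by simp⟩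
  | cons p parts ih =>
    obtain ⟨hnd', hmem'⟩ := pvStepA_char ns p hnd
    obtain ⟨hnd2, hmem2⟩ := ih (pvStepA ns p) hnd'
    refine ⟨hnd2, fun x => ?_⟩
    rw [List.foldl_cons, hmem2 x, hmem' x]
    simp only [List.exists_mem_cons_iff]
    rw [or_assoc]

lemma pvMergeLoop_acc (rest : List (Int × Int)) (out : List (Int × Int)) (lo hi : Int) :
    pvMergeLoop rest out lo hi = out ++ pvMergeLoop rest [] lo hi := by
  induction rest generalizing out lo hi with
  | nil => simp [pvMergeLoop]
  | cons q rest ih =>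
    obtain ⟨l, h⟩ := q
    simp only [pvMergeLoop]
    split_ifs with hle
    · exact ih out lo (max hi h)
    · rw [List.nil_append, ih (out ++ [(lo, hi)]) l h, ih [(lo, hi)] l h]
      simp

lemma pvMergeLoop_char (rest : List (Int × Int)) (lo hi : Int) (hlh : lo ≤ hi)
    (hrest : ∀ p ∈ rest, lo ≤ p.1 ∧ p.1 ≤ p.2)
    (hsorted : rest.Pairwise (fun a b => a.1 ≤ b.1)) :
    ((pvMergeLoop rest [] lo hi).flatMap (fun p => PySem.List.pyRange p.1 (p.2 + 1) 1)).Pairwise (· < ·) ∧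
    ∀ x, x ∈ (pvMergeLoop rest [] lo hi).flatMap (fun p => PySem.List.pyRange p.1 (p.2 + 1) 1) ↔
      (lo ≤ x ∧ x ≤ hi) ∨ ∃ p ∈ rest, p.1 ≤ x ∧ x ≤ p.2 := by
  induction rest generalizing lo hi with
  | nil =>
    simp only [pvMergeLoop, List.nil_append, List.flatMap_cons, List.flatMap_nil,
      List.append_nil]
    refine ⟨PySem.List.pairwise_lt_pyRange_one _ _, fun x => ?_⟩
    simp only [PySem.List.mem_pyRange_one, List.not_mem_nil, false_and, exists_false, or_false]
    omega
  | cons q rest ih =>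
    obtain ⟨l, h⟩ := q
    obtain ⟨hhead, htail⟩ := List.pairwise_cons.mp hsorted
    obtain ⟨hll, hlh2⟩ := hrest (l, h) List.mem_cons_self
    simp only [pvMergeLoop]
    split_ifs with hle
    · obtain ⟨ih1, ih2⟩ := ih lo (max hi h) (le_trans hlh (le_max_left _ _))
        (fun p hp => ⟨(hrest p (List.mem_cons_of_mem _ hp)).1,
                      (hrest p (List.mem_cons_of_mem _ hp)).2⟩) htail
      refine ⟨ih1, fun x => ?_⟩
      rw [ih2 x]
      simp only [List.exists_mem_cons_iff]
      constructor
      · rintro (⟨h1, h2⟩ | hr)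
        · rcases le_or_gt x hi with hx | hx
          · exact Or.inl ⟨h1, hx⟩
          · exact Or.inr (Or.inl ⟨by omega, by omega⟩)
        · exact Or.inr (Or.inr hr)
      · rintro (⟨h1, h2⟩ | ⟨h1, h2⟩ | hr)
        · exact Or.inl ⟨h1, by omega⟩
        · exact Or.inl ⟨by omega, by omega⟩
        · exact Or.inr hr
    · rw [pvMergeLoop_acc rest ([] ++ [(lo, hi)]) l h]
      obtain ⟨ih1, ih2⟩ := ih l h hlh2
        (fun p hp => ⟨hhead p hp, (hrest p (List.mem_cons_of_mem _ hp)).2⟩) htail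
      simp only [List.nil_append, List.flatMap_append, List.flatMap_cons,
        List.flatMap_nil, List.append_nil] at ih1 ih2 ⊢
      have hmemE : ∀ y, y ∈ (pvMergeLoop rest [] l h).flatMap
          (fun p => PySem.List.pyRange p.1 (p.2 + 1) 1) → l ≤ y := by
        intro y hy
        rcases (ih2 y).mp hy with ⟨h1, _⟩ | ⟨p, hp, h1, _⟩
        · exact h1
        · exact le_trans (hhead p hp) h1
      constructor
      · rw [List.pairwise_append]
        refine ⟨PySem.List.pairwise_lt_pyRange_one _ _, ih1, fun a ha b hb => ?_⟩
        rw [PySem.List.mem_pyRange_one] at ha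
        have := hmemE b hb
        omega
      · intro x
        rw [List.mem_append, PySem.List.mem_pyRange_one, ih2 x]
        simp only [List.exists_mem_cons_iff]
        constructor
        · rintro (⟨h1, h2⟩ | ⟨h1, h2⟩ | hr)
          · exact Or.inl ⟨h1, by omega⟩
          · exact Or.inr (Or.inl ⟨h1, h2⟩)
          · exact Or.inr (Or.inr hr)
        · rintro (⟨h1, h2⟩ | ⟨h1, h2⟩ | hr)
          · exact Or.inl ⟨h1, by omega⟩
          · exact Or.inr (Or.inl ⟨h1, h2⟩)
          · exact Or.inr (Or.inr hr)

-- the part-filter A applies is invisible to the intervals: pvInterval "" = none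
lemma pv_mem_filter_iff (parts0 : List String) (x : Int) :
    (∃ p ∈ parts0.filter (fun p => p != ""), ∃ iv, pvInterval p = some iv ∧ iv.1 ≤ x ∧ x ≤ iv.2)
    ↔ ∃ iv ∈ parts0.filterMap pvInterval, iv.1 ≤ x ∧ x ≤ iv.2 := by
  simp only [List.mem_filter, List.mem_filterMap]
  constructor
  · rintro ⟨p, ⟨hp, _⟩, iv, hiv, hx⟩
    exact ⟨iv, ⟨p, hp, hiv⟩, hx⟩
  · rintro ⟨iv, ⟨p, hp, hiv⟩, hx⟩
    refine ⟨p, ⟨hp, ?_⟩, iv, hiv, hx⟩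
    rcases eq_or_ne p "" with rfl | hne
    · rw [pvInterval_empty] at hiv; exact absurd hiv (by simp)
    · simpa using hne

-- the two ports agree
lemma pv_main_eq (s : String) : parse_equipment_input s = parse_equipment_input_alt s := by
  unfold parse_equipment_input parse_equipment_input_alt
  by_cases hts : PySem.Str.strip s = ""
  · rw [hts]
    rfl
  · simp only [if_neg hts]
    generalize (PySem.Str.split? (PySem.Str.strip s) ",").getD [] = pieces
    have hfm : pieces.filterMap (fun p => pvInterval (PySem.Str.strip p))
        = (pieces.map PySem.Str.strip).filterMap pvInterval := by
      rw [List.filterMap_map]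
      rfl
    rw [hfm]
    obtain ⟨hndA, hmemA⟩ := pvFoldA_char ((pieces.map PySem.Str.strip).filter (fun p => p != ""))
      PySem.Set.empty List.nodup_nil
    have hvalid : ∀ iv ∈ (pieces.map PySem.Str.strip).filterMap pvInterval, iv.1 ≤ iv.2 := by
      intro iv hiv
      rcases List.mem_filterMap.mp hiv with ⟨p, _, hp⟩
      exact pvInterval_valid hp
    rcases hsrt : PySem.List.sorted ((pieces.map PySem.Str.strip).filterMap pvInterval)
        (fun t => t.1) false with _ | ⟨⟨lo, hi⟩, rest⟩
    · have hivs0 : (pieces.map PySem.Str.strip).filterMap pvInterval = [] := by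
        rwa [PySem.List.sorted_eq_nil_iff] at hsrt
      have hnums : ((pieces.map PySem.Str.strip).filter (fun p => p != "")).foldl pvStepA
          PySem.Set.empty = [] := by
        rw [List.eq_nil_iff_forall_not_mem]
        intro x hx
        rcases (hmemA x).mp hx with h | hex
        · exact absurd h (List.not_mem_nil)
        · rw [pv_mem_filter_iff, hivs0] at hex
          rcases hex with ⟨iv, hiv, _⟩
          exact absurd hiv (List.not_mem_nil)
      rw [hnums]
      rfl
    · have hmem_sorted : ∀ iv : Int × Int,
          iv ∈ PySem.List.sorted ((pieces.map PySem.Str.strip).filterMap pvInterval)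
            (fun t => t.1) false ↔ iv ∈ (pieces.map PySem.Str.strip).filterMap pvInterval :=
        fun iv => PySem.List.mem_sorted _ _ _ iv
      have hhead_mem : (lo, hi) ∈ (pieces.map PySem.Str.strip).filterMap pvInterval := by
        rw [← hmem_sorted, hsrt]
        exact List.mem_cons_self
      have hpw := PySem.List.sorted_pairwise
        ((pieces.map PySem.Str.strip).filterMap pvInterval) (fun t => t.1)
      rw [hsrt] at hpw
      obtain ⟨hhead_le, htailpw⟩ := List.pairwise_cons.mp hpw
      have hrest_mem : ∀ p ∈ rest, p ∈ (pieces.map PySem.Str.strip).filterMap pvInterval := by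
        intro p hp
        rw [← hmem_sorted, hsrt]
        exact List.mem_cons_of_mem _ hp
      obtain ⟨hP, hM⟩ := pvMergeLoop_char rest lo hi (hvalid _ hhead_mem)
        (fun p hp => ⟨hhead_le p hp, hvalid p (hrest_mem p hp)⟩) htailpw
      show PySem.List.sorted _ (fun x => x) false
          = (pvMergeLoop rest [] lo hi).flatMap (fun p => PySem.List.pyRange p.1 (p.2 + 1) 1)
      have hndR : ((pvMergeLoop rest [] lo hi).flatMap
          (fun p => PySem.List.pyRange p.1 (p.2 + 1) 1)).Nodup := hP.imp ne_of_lt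
      refine PySem.List.sorted_eq_of_perm_of_pairwise_lt _ _ (fun x => x)
        ((List.perm_ext_iff_of_nodup hndR hndA).mpr ?_) hP
      intro x
      rw [hM x, hmemA x]
      have h1 : ((lo ≤ x ∧ x ≤ hi) ∨ ∃ p ∈ rest, p.1 ≤ x ∧ x ≤ p.2)
          ↔ ∃ iv ∈ (lo, hi) :: rest, iv.1 ≤ x ∧ x ≤ iv.2 := by
        simp
      have h2 : (∃ iv ∈ (lo, hi) :: rest, iv.1 ≤ x ∧ x ≤ iv.2)
          ↔ ∃ iv ∈ (pieces.map PySem.Str.strip).filterMap pvInterval, iv.1 ≤ x ∧ x ≤ iv.2 := by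
        rw [← hsrt]
        constructor
        · rintro ⟨iv, hiv, h⟩
          exact ⟨iv, (hmem_sorted iv).mp hiv, h⟩
        · rintro ⟨iv, hiv, h⟩
          exact ⟨iv, (hmem_sorted iv).mpr hiv, h⟩
      rw [h1, h2, ← pv_mem_filter_iff]
      have hempty : (x ∈ PySem.Set.empty) = False := by simp [PySem.Set.empty]
      rw [hempty, false_or]

-- ===== VERDICT (by name: the statement is the Claim_ definition above) =====
theorem parse_equipment_input_spec : Claim_equal_parse_equipment_input := by
  intro s _hd
  exact pv_main_eq s
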